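-- pv_equiv track=rewrite | github.com/TheUnknownCylon/GBA-Pokemon-Hacking | gbahack/sprites/__init__.py | _genmatrix
-- ===== SOURCE A (Python) =====
-- def _genmatrix(blob, w, h):
--     '''
--     Rewrite the blob to a multidimensional array representing the image.
--     Blob should be an array of bytes.
--     The image is build up from 8x8 pixel blocks.
--     '''
--
--     matrix = [[0] * w for _ in range(h)]
--     #TODO: Find out why the following does not work:
--     #  matrix = [[0] * w] * h
--
--     numblocksinw = int(w / 8)
--     numblocksinh = int(h / 8)
--
--     #first read block 0,0; then 0,1; 0,n; 1,0; 1, 1; ... etc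
--     index = 0
--
--     for bh in range(0, numblocksinh):
--         for bw in range(0, numblocksinw):
--             pmh = bh * 8
--             #read 8 pixels * 16 pixels (note: 1 byte in blob = 2 pixels)
--             for _ in range(0, 8):
--                 pmw = bw * 8
--                 for _ in range(0, 4):
--                     pixels = blob[index]
--                     pixel_left = pixels & 0x0F
--                     pixel_right = pixels >> 4
--
--                     matrix[pmh][pmw] = pixel_left
--                     matrix[pmh][pmw+1] = pixel_right
--
--                     index += 1
--                     pmw += 2
--                 pmh += 1
--
--     return matrix
-- ===== SOURCE B (Python) =====
-- def _genmatrix(blob, w, h):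
--     '''
--     Rewrite the blob to a multidimensional array representing the image.
--     Single flat loop over byte indices; block/row/column coordinates are
--     derived from the index with div/mod instead of four nested loops.
--     '''
--     matrix = [[0] * w for _ in range(h)]
--     numblocksinw = int(w / 8)
--     numblocksinh = int(h / 8)
--     total = max(numblocksinw, 0) * max(numblocksinh, 0) * 32
--     for i in range(total):
--         byte = blob[i]
--         c = i % 4
--         r = (i // 4) % 8
--         b = i // 32
--         bw = b % numblocksinw
--         bh = b // numblocksinw
--         pmh = bh * 8 + r
--         pmw = bw * 8 + 2 * c
--         matrix[pmh][pmw] = byte & 0x0F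
--         matrix[pmh][pmw + 1] = byte >> 4
--     return matrix
-- ===== Notes on version B (the rewrite author's own statement) =====
-- stated objective: alternative
-- what changed: Replaced A's four nested block/row/pixel loops (with mutable index, pmh, pmw counters) by a single flat loop over byte indices that derives each byte's block, row and column coordinates with div/mod.
import Mathlib
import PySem

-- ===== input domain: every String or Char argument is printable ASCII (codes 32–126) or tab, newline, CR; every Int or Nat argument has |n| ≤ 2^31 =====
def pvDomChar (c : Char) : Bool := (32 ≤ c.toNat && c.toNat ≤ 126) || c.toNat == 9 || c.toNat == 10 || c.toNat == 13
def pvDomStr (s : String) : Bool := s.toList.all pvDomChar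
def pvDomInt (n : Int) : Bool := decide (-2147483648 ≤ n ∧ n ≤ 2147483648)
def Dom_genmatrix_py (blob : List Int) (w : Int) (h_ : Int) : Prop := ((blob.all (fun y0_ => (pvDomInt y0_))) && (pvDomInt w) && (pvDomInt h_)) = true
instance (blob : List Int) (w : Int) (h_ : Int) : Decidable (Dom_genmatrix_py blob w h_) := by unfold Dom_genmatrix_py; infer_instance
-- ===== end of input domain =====

-- B replaces A's four nested block loops by ONE flat loop over byte indices, deriving the
-- block/row/column coordinates of each byte with div/mod (objective: alternative decomposition).

-- shared tiny helper: `matrix[r][c] = v` (both Pythons contain exactly this statement)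
def setv (m : List (List Int)) (r c v : Int) : List (List Int) :=
  PySem.List.pySetD m r (PySem.List.pySetD (PySem.List.pyGetD m r []) c v)

-- ===== PORT A =====
-- innermost `for _ in range(0, 4)` body; state ((matrix, index), pmw), pmh fixed
def pyA4 (blob : List Int) (pmh : Int) (t : (List (List Int) × Int) × Int) (_e : Int) :
    (List (List Int) × Int) × Int :=
  let pixels := PySem.List.pyGetD blob t.1.2 0
  let pixel_left := PySem.Int.band pixels 15
  let pixel_right := pixels >>> (4 : Nat)
  let matrix := setv t.1.1 pmh t.2 pixel_left
  let matrix := setv matrix pmh (t.2 + 1) pixel_right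
  ((matrix, t.1.2 + 1), t.2 + 2)

-- `for _ in range(0, 8)` body; state ((matrix, index), pmh)
def pyA8 (blob : List Int) (bw : Int) (s : (List (List Int) × Int) × Int) (_e : Int) :
    (List (List Int) × Int) × Int :=
  let t := (PySem.List.pyRange 0 4 1).foldl (pyA4 blob s.2) (s.1, bw * 8)
  (t.1, s.2 + 1)

-- `for bw in range(0, numblocksinw)` body; state (matrix, index)
def pyABW (blob : List Int) (bh : Int) (mi : List (List Int) × Int) (bw : Int) :
    List (List Int) × Int :=
  ((PySem.List.pyRange 0 8 1).foldl (pyA8 blob bw) (mi, bh * 8)).1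

-- `for bh in range(0, numblocksinh)` body
def pyABH (blob : List Int) (nw : Int) (mi : List (List Int) × Int) (bh : Int) :
    List (List Int) × Int :=
  (PySem.List.pyRange 0 nw 1).foldl (pyABW blob bh) mi

def genmatrix_py (blob : List Int) (w : Int) (h_ : Int) : List (List Int) :=
  let matrix := List.replicate h_.toNat (List.replicate w.toNat (0 : Int))
  let nw := PySem.Int.truncdiv w 8     -- int(w / 8)
  let nh := PySem.Int.truncdiv h_ 8    -- int(h / 8)
  ((PySem.List.pyRange 0 nh 1).foldl (pyABH blob nw) (matrix, 0)).1

-- ===== PORT B =====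
-- body of B's single flat loop over byte index i
def pyBstep (blob : List Int) (nw : Int) (m : List (List Int)) (i : Int) : List (List Int) :=
  let byte := PySem.List.pyGetD blob i 0
  let c := PySem.Int.mod i 4
  let r := PySem.Int.mod (PySem.Int.floordiv i 4) 8
  let b := PySem.Int.floordiv i 32
  let bw := PySem.Int.mod b nw
  let bh := PySem.Int.floordiv b nw
  let pmh := bh * 8 + r
  let pmw := bw * 8 + 2 * c
  let m := setv m pmh pmw (PySem.Int.band byte 15)
  setv m pmh (pmw + 1) (byte >>> (4 : Nat))

def genmatrix_py_alt (blob : List Int) (w : Int) (h_ : Int) : List (List Int) :=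
  let matrix := List.replicate h_.toNat (List.replicate w.toNat (0 : Int))
  let nw := PySem.Int.truncdiv w 8
  let nh := PySem.Int.truncdiv h_ 8
  let total := max nw 0 * max nh 0 * 32
  (PySem.List.pyRange 0 total 1).foldl (pyBstep blob nw) matrix

-- ===== PRECONDITION & SPEC =====
-- Pre_ excludes exactly the inputs on which A raises IndexError: blobs shorter than the
-- 32 * (w//8) * (h//8) bytes the block loops read (when both block counts are positive).
def Pre_genmatrix_py (blob : List Int) (w : Int) (h_ : Int) : Prop :=
  PySem.Int.truncdiv w 8 ≤ 0 ∨ PySem.Int.truncdiv h_ 8 ≤ 0 ∨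
    32 * PySem.Int.truncdiv w 8 * PySem.Int.truncdiv h_ 8 ≤ (blob.length : Int)
instance (blob : List Int) (w : Int) (h_ : Int) : Decidable (Pre_genmatrix_py blob w h_) := by
  unfold Pre_genmatrix_py; infer_instance

def pvWitness_genmatrix_py : List Int × Int × Int :=
  ([1,2,3,4,5,6,7,8,9,10,11,12,13,14,15,16,17,18,19,20,21,22,23,24,25,26,27,28,29,30,31,32], 8, 8)

def Spec_genmatrix_py (blob : List Int) (w : Int) (h_ : Int) (out : List (List Int)) : Prop :=
  out = genmatrix_py_alt blob w h_
instance (blob : List Int) (w : Int) (h_ : Int) (out : List (List Int)) :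
    Decidable (Spec_genmatrix_py blob w h_ out) := by unfold Spec_genmatrix_py; infer_instance

-- ===== CLAIM (what is proved, stated in full; the proofs are below) =====
def Claim_equal_genmatrix_py : Prop := ∀ (blob : List Int) (w : Int) (h_ : Int),
  Dom_genmatrix_py blob w h_ → Pre_genmatrix_py blob w h_ →
    Spec_genmatrix_py blob w h_ (genmatrix_py blob w h_)

-- ===== LEMMAS AND PROOFS =====

-- `flat blob nw m s n` = B's step applied at the n consecutive indices s, s+1, …, s+n-1
def flat (blob : List Int) (nw : Int) (m : List (List Int)) (s : Int) : Nat → List (List Int)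
  | 0 => m
  | n + 1 => pyBstep blob nw (flat blob nw m s n) (s + n)

lemma flat_cons (blob : List Int) (nw : Int) (m : List (List Int)) (s : Int) (n : Nat) :
    flat blob nw m s (n + 1) = flat blob nw (pyBstep blob nw m s) (s + 1) n := by
  induction n with
  | zero => simp [flat]
  | succ k ih =>
      show pyBstep blob nw (flat blob nw m s (k + 1)) (s + (k + 1 : Nat)) = _
      rw [ih]
      show _ = pyBstep blob nw (flat blob nw (pyBstep blob nw m s) (s + 1) k) ((s + 1) + (k : Nat))
      congr 1
      push_cast; ring

lemma flat_add (blob : List Int) (nw : Int) (m : List (List Int)) (s : Int) (a b : Nat) :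
    flat blob nw (flat blob nw m s a) (s + a) b = flat blob nw m s (a + b) := by
  induction b with
  | zero => simp [flat]
  | succ k ih =>
      show pyBstep blob nw (flat blob nw (flat blob nw m s a) (s + a) k) ((s + a) + (k : Nat)) = _
      rw [ih]
      show _ = pyBstep blob nw (flat blob nw m s (a + k)) (s + ((a + k : Nat) : Int))
      congr 1
      push_cast; ring

-- B's one flat step at index (bh*nw+bw)*32 + r*4 + c recovers A's coordinates
lemma step_eq (blob : List Int) (nw bh bw r c : Int) (hnw : 0 < nw)
    (hbh : 0 ≤ bh) (hbw0 : 0 ≤ bw) (hbw : bw < nw)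
    (hr0 : 0 ≤ r) (hr : r < 8) (hc0 : 0 ≤ c) (hc : c < 4) (m : List (List Int)) :
    pyBstep blob nw m ((bh * nw + bw) * 32 + r * 4 + c) =
      setv (setv m (bh * 8 + r) (bw * 8 + 2 * c)
              (PySem.Int.band (PySem.List.pyGetD blob ((bh * nw + bw) * 32 + r * 4 + c) 0) 15))
        (bh * 8 + r) (bw * 8 + 2 * c + 1)
        ((PySem.List.pyGetD blob ((bh * nw + bw) * 32 + r * 4 + c) 0) >>> (4 : Nat)) := by
  have hBnn : 0 ≤ bh * nw + bw := by
    have := mul_nonneg hbh (le_of_lt hnw); omega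
  have hmodnw : (bh * nw + bw) % nw = bw := by
    rw [add_comm, mul_comm, Int.add_mul_emod_self_left]
    exact Int.emod_eq_of_lt hbw0 hbw
  have hdivnw : (bh * nw + bw) / nw = bh := by
    rw [add_comm, Int.add_mul_ediv_right _ _ (by omega : nw ≠ 0),
      Int.ediv_eq_zero_of_lt hbw0 hbw, zero_add]
  simp only [pyBstep]
  rw [PySem.Int.mod_eq_emod_of_pos (by norm_num : (0:Int) < 4),
      PySem.Int.floordiv_eq_ediv_of_pos (by norm_num : (0:Int) < 4),
      PySem.Int.mod_eq_emod_of_pos (by norm_num : (0:Int) < 8),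
      PySem.Int.floordiv_eq_ediv_of_pos (by norm_num : (0:Int) < 32),
      PySem.Int.mod_eq_emod_of_pos hnw, PySem.Int.floordiv_eq_ediv_of_pos hnw]
  have h32 : ((bh * nw + bw) * 32 + r * 4 + c) / 32 = bh * nw + bw := by
    generalize bh * nw + bw = B at *; omega
  have h4 : ((bh * nw + bw) * 32 + r * 4 + c) % 4 = c := by
    generalize bh * nw + bw = B at *; omega
  have h48 : (((bh * nw + bw) * 32 + r * 4 + c) / 4) % 8 = r := by
    generalize bh * nw + bw = B at *; omega
  rw [h32, h4, h48, hmodnw, hdivnw]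

-- the innermost 4-iteration loop of A, started c pixels-pairs in, is `flat`
lemma l4 (blob : List Int) (nw bh bw r : Int) (hnw : 0 < nw)
    (hbh : 0 ≤ bh) (hbw0 : 0 ≤ bw) (hbw : bw < nw) (hr0 : 0 ≤ r) (hr : r < 8) :
    ∀ (L : List Int) (c : Int), 0 ≤ c → c + L.length ≤ 4 → ∀ m,
      L.foldl (pyA4 blob (bh * 8 + r))
          ((m, (bh * nw + bw) * 32 + r * 4 + c), bw * 8 + 2 * c)
        = ((flat blob nw m ((bh * nw + bw) * 32 + r * 4 + c) L.length,
            (bh * nw + bw) * 32 + r * 4 + c + L.length),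
           bw * 8 + 2 * (c + L.length)) := by
  intro L
  induction L with
  | nil => intro c _ _ m; simp [flat]
  | cons x L ih =>
      intro c hc0 hc4 m
      have hstep : pyA4 blob (bh * 8 + r)
          ((m, (bh * nw + bw) * 32 + r * 4 + c), bw * 8 + 2 * c) x
          = ((pyBstep blob nw m ((bh * nw + bw) * 32 + r * 4 + c),
              (bh * nw + bw) * 32 + r * 4 + (c + 1)), bw * 8 + 2 * (c + 1)) := by
        rw [step_eq blob nw bh bw r c hnw hbh hbw0 hbw hr0 hr hc0 (by simp at hc4; omega)]
        simp only [pyA4]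
        refine congrArg₂ Prod.mk (congrArg₂ Prod.mk rfl (by ring)) (by ring)
      rw [List.foldl_cons, hstep,
        ih (c + 1) (by omega) (by simp at hc4 ⊢; omega)]
      simp only [List.length_cons]
      rw [flat_cons]
      have harg : (bh * nw + bw) * 32 + r * 4 + (c + 1)
          = ((bh * nw + bw) * 32 + r * 4 + c) + 1 := by ring
      rw [harg]
      refine congrArg₂ Prod.mk (congrArg₂ Prod.mk rfl ?_) ?_
      · push_cast; ring
      · push_cast; ring

-- the 8-iteration row loop of A, started r rows in, is `flat` of 4·(rows) steps
lemma l8 (blob : List Int) (nw bh bw : Int) (hnw : 0 < nw)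
    (hbh : 0 ≤ bh) (hbw0 : 0 ≤ bw) (hbw : bw < nw) :
    ∀ (L : List Int) (r : Int), 0 ≤ r → r + L.length ≤ 8 → ∀ m,
      L.foldl (pyA8 blob bw) ((m, (bh * nw + bw) * 32 + r * 4), bh * 8 + r)
        = ((flat blob nw m ((bh * nw + bw) * 32 + r * 4) (4 * L.length),
            (bh * nw + bw) * 32 + r * 4 + 4 * L.length),
           bh * 8 + r + L.length) := by
  intro L
  induction L with
  | nil => intro r _ _ m; simp [flat]
  | cons x L ih =>
      intro r hr0 hr8 m
      have hr8' : r < 8 := by simp at hr8; omega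
      have hstep : pyA8 blob bw ((m, (bh * nw + bw) * 32 + r * 4), bh * 8 + r) x
          = ((flat blob nw m ((bh * nw + bw) * 32 + r * 4) 4,
              (bh * nw + bw) * 32 + (r + 1) * 4), bh * 8 + (r + 1)) := by
        simp only [pyA8]
        have h0 : (bh * nw + bw) * 32 + r * 4 = (bh * nw + bw) * 32 + r * 4 + 0 := by ring
        have h0' : bw * 8 = bw * 8 + 2 * 0 := by ring
        rw [h0, h0',
          l4 blob nw bh bw r hnw hbh hbw0 hbw hr0 hr8' (PySem.List.pyRange 0 4 1) 0
            (by norm_num) (by norm_num)]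
        refine congrArg₂ Prod.mk (congrArg₂ Prod.mk rfl ?_) ?_ <;> norm_num <;> ring
      rw [List.foldl_cons, hstep,
        ih (r + 1) (by omega) (by simp at hr8 ⊢; omega)]
      have hmerge := flat_add blob nw m ((bh * nw + bw) * 32 + r * 4) 4 (4 * L.length)
      refine congrArg₂ Prod.mk (congrArg₂ Prod.mk ?_ ?_) ?_
      · rw [show (bh * nw + bw) * 32 + (r + 1) * 4
              = ((bh * nw + bw) * 32 + r * 4) + ((4 : Nat) : Int) by push_cast; ring, hmerge]
        congr 1
        simp only [List.length_cons]
        omega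
      · simp only [List.length_cons]; push_cast; ring
      · simp only [List.length_cons]; push_cast; ring

-- the bw loop of A over the first t block columns is `flat` of 32·t steps
lemma lbw (blob : List Int) (nw bh : Int) (hnw : 0 < nw) (hbh : 0 ≤ bh) :
    ∀ (t : Nat), (t : Int) ≤ nw → ∀ m,
      ((List.range t).map (fun (j : Nat) => (j : Int))).foldl (pyABW blob bh) (m, bh * nw * 32)
        = (flat blob nw m (bh * nw * 32) (32 * t), bh * nw * 32 + 32 * t) := by
  intro t
  induction t with
  | zero => intro _ m; simp [flat]
  | succ k ih =>
      intro hk m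
      rw [List.range_succ, List.map_append, List.foldl_append,
        ih (by push_cast at hk ⊢; omega)]
      simp only [List.map_cons, List.map_nil, List.foldl_cons, List.foldl_nil]
      have hkw : (k : Int) < nw := by push_cast at hk; omega
      have hidx : bh * nw * 32 + 32 * k = (bh * nw + (k : Int)) * 32 + 0 * 4 := by ring
      have h8 : pyABW blob bh (flat blob nw m (bh * nw * 32) (32 * k), bh * nw * 32 + 32 * k)
            (k : Int)
          = (flat blob nw (flat blob nw m (bh * nw * 32) (32 * k))
              (bh * nw * 32 + 32 * k) 32, bh * nw * 32 + 32 * k + 32) := by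
        simp only [pyABW]
        rw [show ((flat blob nw m (bh * nw * 32) (32 * k), bh * nw * 32 + 32 * k), bh * 8)
              = ((flat blob nw m (bh * nw * 32) (32 * k),
                  (bh * nw + (k : Int)) * 32 + 0 * 4), bh * 8 + 0) by
            refine congrArg₂ Prod.mk (congrArg₂ Prod.mk rfl (by ring)) (by ring),
          l8 blob nw bh (k : Int) hnw hbh (by positivity) hkw (PySem.List.pyRange 0 8 1) 0
            (by norm_num) (by norm_num)]
        refine congrArg₂ Prod.mk ?_ ?_ <;> norm_num <;> ring_nf
        rfl
      rw [h8, show bh * nw * 32 + 32 * (k : Int) = bh * nw * 32 + ((32 * k : Nat) : Int) by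
          push_cast; ring,
        flat_add blob nw m (bh * nw * 32) (32 * k) 32]
      exact congrArg₂ Prod.mk rfl (by push_cast; ring)

-- the bh loop of A over the first u block rows is `flat` of 32·nw·u steps
lemma lbh (blob : List Int) (nw : Int) (nwN : Nat) (hnw : nw = (nwN : Int)) (hpos : 0 < nwN) :
    ∀ (u : Nat) (m : List (List Int)),
      ((List.range u).map (fun (j : Nat) => (j : Int))).foldl (pyABH blob nw) (m, 0)
        = (flat blob nw m 0 (32 * nwN * u), ((32 * nwN * u : Nat) : Int)) := by
  intro u
  induction u with
  | zero => intro m; simp [flat]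
  | succ k ih =>
      intro m
      rw [List.range_succ, List.map_append, List.foldl_append, ih]
      simp only [List.map_cons, List.map_nil, List.foldl_cons, List.foldl_nil, pyABH]
      have hrange : PySem.List.pyRange 0 nw 1 = (List.range nwN).map (fun (j : Nat) => (j : Int)) := by
        rw [hnw]; exact PySem.List.pyRange_zero_natCast nwN
      have hstart : ((32 * nwN * k : Nat) : Int) = (k : Int) * nw * 32 := by
        rw [hnw]; push_cast; ring
      rw [hrange, hstart,
        lbw blob nw (k : Int) (by omega) (by positivity) nwN (by omega)]
      refine congrArg₂ Prod.mk ?_ (by rw [hnw]; push_cast; ring)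
      rw [show (k : Int) * nw * 32 = (0 : Int) + ((32 * nwN * k : Nat) : Int) by
          rw [hnw]; push_cast; ring,
        flat_add blob nw m 0 (32 * nwN * k) (32 * nwN)]
      rfl

-- B's flat fold over range N equals `flat`
lemma flat_eq_foldl (blob : List Int) (nw : Int) : ∀ (N : Nat) (m : List (List Int)),
    ((List.range N).map (fun (j : Nat) => (j : Int))).foldl (pyBstep blob nw) m = flat blob nw m 0 N := by
  intro N
  induction N with
  | zero => intro m; simp [flat]
  | succ k ih =>
      intro m
      rw [List.range_succ, List.map_append, List.foldl_append, ih]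
      simp [flat]

lemma foldl_pyABH_const (blob : List Int) (nw : Int) (hnw : nw ≤ 0) :
    ∀ (l : List Int) (s : List (List Int) × Int), l.foldl (pyABH blob nw) s = s := by
  intro l
  induction l with
  | nil => intro s; rfl
  | cons x l ih =>
      intro s
      rw [List.foldl_cons]
      have : pyABH blob nw s x = s := by
        simp only [pyABH]
        have : PySem.List.pyRange 0 nw 1 = [] := by
          simp only [PySem.List.pyRange]
          split <;> simp_all
        rw [this, List.foldl_nil]
      rw [this, ih]

-- ===== VERDICT (by name: the statement is the Claim_ definition above) =====
theorem genmatrix_py_spec : Claim_equal_genmatrix_py := by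
  intro blob w h_ _hDom _hPre
  unfold Spec_genmatrix_py
  simp only [genmatrix_py, genmatrix_py_alt]
  set m0 := List.replicate h_.toNat (List.replicate w.toNat (0 : Int)) with hm0
  set nw := PySem.Int.truncdiv w 8 with hnw
  set nh := PySem.Int.truncdiv h_ 8 with hnh
  by_cases hw : 0 < nw
  · by_cases hh : 0 < nh
    · -- both block counts positive
      have hmax : max nw 0 * max nh 0 * 32 = nw * nh * 32 := by
        rw [max_eq_left (le_of_lt hw), max_eq_left (le_of_lt hh)]
      obtain ⟨nwN, hnwN⟩ : ∃ n : Nat, nw = (n : Int) := ⟨nw.toNat, by omega⟩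
      obtain ⟨nhN, hnhN⟩ : ∃ n : Nat, nh = (n : Int) := ⟨nh.toNat, by omega⟩
      have hT : nw * nh * 32 = ((nwN * nhN * 32 : Nat) : Int) := by
        rw [hnwN, hnhN]; push_cast; ring
      rw [hmax, hT, PySem.List.pyRange_zero_natCast, flat_eq_foldl,
        show PySem.List.pyRange 0 nh 1 = (List.range nhN).map (fun (j : Nat) => (j : Int)) by
          rw [hnhN]; exact PySem.List.pyRange_zero_natCast nhN,
        lbh blob nw nwN hnwN (by omega) nhN m0]
      show flat blob nw m0 0 (32 * nwN * nhN) = flat blob nw m0 0 (nwN * nhN * 32)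
      congr 1
      ring
    · -- no block rows: both return the zero matrix
      have hrange : PySem.List.pyRange 0 nh 1 = [] := by
        simp only [PySem.List.pyRange]
        split <;> simp_all
      have hmax : max nw 0 * max nh 0 * 32 = 0 := by
        rw [max_eq_right (by omega : nh ≤ 0)]; ring
      rw [hrange, hmax, List.foldl_nil]
      rfl
  · -- no block columns: A's inner loops are empty, B's total is 0
    have hmax : max nw 0 * max nh 0 * 32 = 0 := by
      rw [max_eq_right (by omega : nw ≤ 0)]; ring
    rw [hmax, foldl_pyABH_const blob nw (by omega)]
    rfl
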